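-- pv_equiv track=rewrite | github.com/adcosta17/somrit | filter.py | filter_min_reads
-- ===== SOURCE A (Python) =====
-- def get_nearby(chrom, start, end, seen):
--     i = start
--     count = 0
--     nearby = {}
--     if chrom not in seen:
--         return nearby
--     while i < end:
--         if i in seen[chrom]:
--             nearby[i] = seen[chrom][i]
--             count += 1
--         i += 1
--     return nearby
--
-- def filter_min_reads(chrom, start, end, seen, min_reads):
--     reads = {}
--     nearby = get_nearby(chrom, start-50, end+50, seen)
--     for item in nearby:
--         for j in nearby[item]:
--             read = j.split(':')[1]
--             reads[read] = 1
--     if len(reads) < min_reads: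
--         return "min_reads"
--     return None
-- ===== SOURCE B (Python) =====
-- def filter_min_reads(chrom, start, end, seen, min_reads):
--     # One pass over the positions actually recorded for chrom (instead of
--     # scanning every integer in [start-50, end+50)), collecting distinct
--     # read names in a set.
--     lo = start - 50
--     hi = end + 50
--     reads = set()
--     for pos, names in seen.get(chrom, {}).items():
--         if lo <= pos < hi:
--             for j in names:
--                 reads.add(j.split(':')[1])
--     if len(reads) < min_reads:
--         return "min_reads"
--     return None
-- ===== Notes on version B (the rewrite author's own statement) =====
-- stated objective: alternative
-- what changed: B iterates once over the positions stored for chrom and filters them against [start-50, end+50), collecting distinct reads in a set, instead of A's scan over every integer position in that window with a dict lookup per position.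
-- outside the precondition, e.g. on filter_min_reads('c', 0, 0, {'c': {1: ['noread']}}, 1): A raises IndexError, B raises IndexError
import Mathlib
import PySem

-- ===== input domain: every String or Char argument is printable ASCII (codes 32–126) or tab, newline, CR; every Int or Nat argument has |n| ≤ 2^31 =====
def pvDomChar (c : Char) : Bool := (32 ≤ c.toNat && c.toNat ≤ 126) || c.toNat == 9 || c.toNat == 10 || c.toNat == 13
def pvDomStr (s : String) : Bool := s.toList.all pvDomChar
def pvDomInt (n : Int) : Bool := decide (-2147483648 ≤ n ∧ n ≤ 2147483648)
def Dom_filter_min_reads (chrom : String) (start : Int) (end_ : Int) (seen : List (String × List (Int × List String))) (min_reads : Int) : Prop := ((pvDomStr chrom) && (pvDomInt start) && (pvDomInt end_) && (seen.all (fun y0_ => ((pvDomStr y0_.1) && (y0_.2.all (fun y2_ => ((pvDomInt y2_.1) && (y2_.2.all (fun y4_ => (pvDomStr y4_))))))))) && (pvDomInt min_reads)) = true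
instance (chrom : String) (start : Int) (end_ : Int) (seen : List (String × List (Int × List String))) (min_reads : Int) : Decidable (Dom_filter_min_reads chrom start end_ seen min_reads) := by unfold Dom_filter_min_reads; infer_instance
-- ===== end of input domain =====

-- ===== PORT A =====
-- B replaces A's scan over every integer position in [start-50, end+50) by one
-- pass over the positions stored for chrom; same result, a different traversal.

-- read name of an alignment string: j.split(':')[1] (exact; none = IndexError, excluded by Pre_)
def pvSplitRead (j : String) : Option String :=
  PySem.List.pyGet? ((PySem.Chars.splitOn j.toList [':']).map String.ofList) 1

-- the 'while i < end' loop of get_nearby ('count' is dropped: A never reads it)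
def pvNearbyLoop (m : List (Int × List String)) (i end_ : Int)
    (nearby : PySem.Dict Int (List String)) : PySem.Dict Int (List String) :=
  if i < end_ then
    let nearby' := match (PySem.Dict.mk m).get? i with
      | some v => nearby.insert i v
      | none => nearby
    pvNearbyLoop m (i + 1) end_ nearby'
  else nearby
termination_by (end_ - i).toNat
decreasing_by omega

def pvGetNearby (chrom : String) (start end_ : Int)
    (seen : List (String × List (Int × List String))) : PySem.Dict Int (List String) :=
  match (PySem.Dict.mk seen).get? chrom with
  | none => PySem.Dict.empty
  | some m => pvNearbyLoop m start end_ PySem.Dict.empty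

def filter_min_reads (chrom : String) (start : Int) (end_ : Int) (seen : List (String × List (Int × List String))) (min_reads : Int) : Option String :=
  let nearby := pvGetNearby chrom (start - 50) (end_ + 50) seen
  let reads : PySem.Dict String Int :=
    nearby.items.foldl (fun reads item =>
      item.2.foldl (fun reads j =>
        match pvSplitRead j with
        | some read => reads.insert read 1
        | none => reads   -- Python raises IndexError here; Pre_ excludes it
      ) reads) PySem.Dict.empty
  if (reads.size : Int) < min_reads then some "min_reads" else none

-- ===== PORT B =====
def filter_min_reads_alt (chrom : String) (start : Int) (end_ : Int) (seen : List (String × List (Int × List String))) (min_reads : Int) : Option String :=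
  let lo := start - 50
  let hi := end_ + 50
  let m := (PySem.Dict.mk seen).getD chrom []
  let reads : PySem.Set String :=
    m.foldl (fun s pn =>
      if lo ≤ pn.1 ∧ pn.1 < hi then
        pn.2.foldl (fun s j =>
          match pvSplitRead j with
          | some r => PySem.Set.add s r
          | none => s   -- Python raises IndexError here; Pre_ excludes it
        ) s
      else s) PySem.Set.empty
  if (reads.length : Int) < min_reads then some "min_reads" else none

-- ===== PRECONDITION & SPEC =====
-- Pre_ excludes (a) inputs where some in-window read string for chrom has no ':', on which
-- A raises IndexError, and (b) chromosome entries with duplicate position keys, on which A's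
-- first-match dict lookup and B's full iteration may legitimately disagree (Python dicts
-- cannot carry duplicate keys, so the corner is an artefact of the association-list encoding).
def Pre_filter_min_reads (chrom : String) (start : Int) (end_ : Int) (seen : List (String × List (Int × List String))) (min_reads : Int) : Prop :=
  let m := (PySem.Dict.mk seen).getD chrom []
  (m.map Prod.fst).Nodup ∧
    ∀ pr ∈ m, (start - 50 ≤ pr.1 ∧ pr.1 < end_ + 50) →
      ∀ j ∈ pr.2, 2 ≤ (PySem.Chars.splitOn j.toList [':']).length
instance (chrom : String) (start : Int) (end_ : Int) (seen : List (String × List (Int × List String))) (min_reads : Int) : Decidable (Pre_filter_min_reads chrom start end_ seen min_reads) := by unfold Pre_filter_min_reads; infer_instance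

def pvWitness_filter_min_reads : String × Int × Int × (List (String × List (Int × List String))) × Int :=
  ("c", 0, 1, [("c", [(10, ["r1:a", "r2:b"]), (200, ["r3:c"])])], 2)

def Spec_filter_min_reads (chrom : String) (start : Int) (end_ : Int) (seen : List (String × List (Int × List String))) (min_reads : Int) (out : Option String) : Prop := out = filter_min_reads_alt chrom start end_ seen min_reads
instance (chrom : String) (start : Int) (end_ : Int) (seen : List (String × List (Int × List String))) (min_reads : Int) (out : Option String) : Decidable (Spec_filter_min_reads chrom start end_ seen min_reads out) := by unfold Spec_filter_min_reads; infer_instance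

-- ===== CLAIM (what is proved, stated in full; the proofs are below) =====
def Claim_equal_filter_min_reads : Prop := ∀ (chrom : String) (start : Int) (end_ : Int) (seen : List (String × List (Int × List String))) (min_reads : Int), Dom_filter_min_reads chrom start end_ seen min_reads → Pre_filter_min_reads chrom start end_ seen min_reads → Spec_filter_min_reads chrom start end_ seen min_reads (filter_min_reads chrom start end_ seen min_reads)

-- ===== LEMMAS AND PROOFS =====

-- the multiset of reads a block of alignment strings contributes
def pvReads (l : List (Int × List String)) : List String :=
  l.flatMap (fun pr => pr.2.filterMap pvSplitRead)

-- A's inner loop is an insert-fold over the extracted read names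
theorem pv_foldl_match_insert (xs : List String) (d : PySem.Dict String Int) :
    xs.foldl (fun r j => match pvSplitRead j with
      | some read => r.insert read 1
      | none => r) d
    = (xs.filterMap pvSplitRead).foldl (fun r read => r.insert read 1) d := by
  induction xs generalizing d with
  | nil => rfl
  | cons x xs ih => cases h : pvSplitRead x <;> simp [h, ih]

-- B's inner loop is an add-fold over the extracted read names
theorem pv_foldl_match_add (xs : List String) (s : PySem.Set String) :
    xs.foldl (fun s j => match pvSplitRead j with
      | some r => PySem.Set.add s r
      | none => s) s
    = (xs.filterMap pvSplitRead).foldl PySem.Set.add s := by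
  induction xs generalizing s with
  | nil => rfl
  | cons x xs ih => cases h : pvSplitRead x <;> simp [h, ih]

theorem pv_keys_readsA (l : List (Int × List String)) :
    (l.foldl (fun reads item =>
      item.2.foldl (fun reads j => match pvSplitRead j with
        | some read => reads.insert read 1
        | none => reads) reads) (PySem.Dict.empty : PySem.Dict String Int)).keys
    = PySem.Set.ofList (pvReads l) := by
  have h1 : (l.foldl (fun reads item =>
      item.2.foldl (fun reads j => match pvSplitRead j with
        | some read => reads.insert read 1
        | none => reads) reads) (PySem.Dict.empty : PySem.Dict String Int))
      = (pvReads l).foldl (fun r read => r.insert read 1) PySem.Dict.empty := by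
    rw [pvReads, List.foldl_flatMap]
    exact PySem.List.foldl_congr_mem _ _ _ _ (fun d pr _ => pv_foldl_match_insert pr.2 d)
  rw [h1]
  have h2 := PySem.Dict.keys_foldl_insert_key (ν := Int) (pvReads l) (fun r => r)
    (fun _ _ => (1 : Int)) PySem.Dict.empty
  simpa [PySem.Set.update, PySem.Set.ofList_eq_foldl] using h2

theorem pv_setB (l : List (Int × List String)) (lo hi : Int) :
    (l.foldl (fun s pn =>
      if lo ≤ pn.1 ∧ pn.1 < hi then
        pn.2.foldl (fun s j => match pvSplitRead j with
          | some r => PySem.Set.add s r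
          | none => s) s
      else s) (PySem.Set.empty : PySem.Set String))
    = PySem.Set.ofList (pvReads (l.filter (fun pr => decide (lo ≤ pr.1 ∧ pr.1 < hi)))) := by
  rw [pvReads, PySem.Set.ofList_eq_foldl, List.foldl_flatMap, List.foldl_filter]
  apply PySem.List.foldl_congr_mem
  intro s pr _
  simp only [decide_eq_true_eq]
  split_ifs with h
  · exact pv_foldl_match_add pr.2 s
  · rfl

-- membership in the dict built by A's position scan (keys of m distinct)
theorem pv_nearbyLoop_mem (m : List (Int × List String)) (hi : Int)
    (hN : (m.map Prod.fst).Nodup) (pr : Int × List String) :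
    ∀ (n : Nat) (i : Int) (acc : PySem.Dict Int (List String)),
      (hi - i).toNat = n → (∀ p ∈ acc.keys, p < i) →
    (pr ∈ (pvNearbyLoop m i hi acc).items ↔
      pr ∈ acc.items ∨ (pr ∈ m ∧ i ≤ pr.1 ∧ pr.1 < hi)) := by
  intro n
  induction n with
  | zero =>
    intro i acc hn _hlt
    have hcond : ¬ i < hi := by omega
    rw [pvNearbyLoop]
    simp only [if_neg hcond]
    constructor
    · exact Or.inl
    · rintro (h | ⟨_, h2, h3⟩)
      · exact h
      · omega
  | succ n ih =>
    intro i acc hn hlt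
    by_cases hcond : i < hi
    · rw [pvNearbyLoop]
      simp only [if_pos hcond]
      cases hg : (PySem.Dict.mk m).get? i with
      | some v =>
        have hmem : (i, v) ∈ m :=
          (PySem.Dict.get?_eq_some_iff_mem_items (PySem.Dict.mk m) i v hN).mp hg
        have hlt' : ∀ p ∈ (acc.insert i v).keys, p < i + 1 := by
          intro p hp
          rcases (PySem.Dict.mem_keys_insert acc i p v).mp hp with h | h
          · omega
          · have := hlt p h; omega
        rw [ih (i + 1) (acc.insert i v) (by omega) hlt']
        constructor
        · rintro (h | ⟨h, h2, h3⟩)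
          · rcases (PySem.Dict.mem_items_insert acc i v pr).mp h with h | ⟨h, _⟩
            · subst h; exact Or.inr ⟨hmem, by omega⟩
            · exact Or.inl h
          · exact Or.inr ⟨h, by omega⟩
        · rintro (h | ⟨h, h2, h3⟩)
          · have : pr.1 < i := hlt pr.1 (by
              simp only [PySem.Dict.keys]
              exact List.mem_map_of_mem h)
            exact Or.inl ((PySem.Dict.mem_items_insert acc i v pr).mpr
              (Or.inr ⟨h, by omega⟩))
          · rcases eq_or_lt_of_le h2 with heq | hgt
            · -- pr.1 = i: pr must be (i, v) by first-match lookup on distinct keys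
              have : pr = (i, v) := by
                have hget : (PySem.Dict.mk m).get? pr.1 = some pr.2 :=
                  PySem.Dict.get?_of_mem_items (PySem.Dict.mk m) (by exact h) hN
                rw [heq] at hg
                rw [hget] at hg
                have : pr.2 = v := by injection hg
                exact Prod.ext heq.symm this
              exact Or.inl ((PySem.Dict.mem_items_insert acc i v pr).mpr (Or.inl this))
            · exact Or.inr ⟨h, by omega, h3⟩
      | none =>
        rw [ih (i + 1) acc (by omega) (by intro p hp; have := hlt p hp; omega)]
        constructor
        · rintro (h | ⟨h, h2, h3⟩)
          · exact Or.inl h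
          · exact Or.inr ⟨h, by omega, h3⟩
        · rintro (h | ⟨h, h2, h3⟩)
          · exact Or.inl h
          · rcases eq_or_lt_of_le h2 with heq | hgt
            · exfalso
              have hget : (PySem.Dict.mk m).get? pr.1 = some pr.2 :=
                PySem.Dict.get?_of_mem_items (PySem.Dict.mk m) (by exact h) hN
              rw [heq] at hg
              rw [hget] at hg
              exact Option.some_ne_none _ hg
            · exact Or.inr ⟨h, by omega, h3⟩
    · rw [pvNearbyLoop]
      simp only [if_neg hcond]
      constructor
      · exact Or.inl
      · rintro (h | ⟨_, h2, h3⟩)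
        · exact h
        · omega

theorem pv_size_eq_keys_length {κ ν : Type} [BEq κ] (d : PySem.Dict κ ν) :
    d.size = d.keys.length := by
  simp [PySem.Dict.size, PySem.Dict.keys]

-- ===== VERDICT (by name: the statement is the Claim_ definition above) =====
theorem filter_min_reads_spec : Claim_equal_filter_min_reads := by
  intro chrom start end_ seen min_reads _hdom hpre
  unfold Spec_filter_min_reads
  unfold filter_min_reads filter_min_reads_alt pvGetNearby
  obtain ⟨hN, _hsplit⟩ := hpre
  cases hg : (PySem.Dict.mk seen).get? chrom with
  | none =>
    simp only [hg, PySem.Dict.getD_eq_get?_getD, Option.getD_none]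
    rfl
  | some m =>
    have hmD : (PySem.Dict.mk seen).getD chrom [] = m := by
      rw [PySem.Dict.getD_eq_get?_getD, hg]; rfl
    rw [hmD] at hN
    simp only [hmD]
    -- both counts are the cardinality of the same set of read names
    have hA := pv_keys_readsA (pvNearbyLoop m (start - 50) (end_ + 50) PySem.Dict.empty).items
    have hB := pv_setB m (start - 50) (end_ + 50)
    have hperm : (PySem.Set.ofList (pvReads (pvNearbyLoop m (start - 50) (end_ + 50) PySem.Dict.empty).items)).Perm
        (PySem.Set.ofList (pvReads (m.filter (fun pr => decide (start - 50 ≤ pr.1 ∧ pr.1 < end_ + 50))))) := by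
      rw [List.perm_ext_iff_of_nodup (PySem.Set.nodup_ofList _) (PySem.Set.nodup_ofList _)]
      intro r
      rw [PySem.Set.mem_ofList, PySem.Set.mem_ofList]
      simp only [pvReads, List.mem_flatMap, List.mem_filter, decide_eq_true_eq]
      constructor
      · rintro ⟨pr, hpr, hr⟩
        have := (pv_nearbyLoop_mem m (end_ + 50) hN pr _ (start - 50) PySem.Dict.empty rfl
          (by intro p hp; simp [PySem.Dict.keys, PySem.Dict.empty] at hp)).mp hpr
        rcases this with h | ⟨h1, h2⟩
        · simp [PySem.Dict.empty] at h
        · exact ⟨pr, ⟨h1, h2⟩, hr⟩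
      · rintro ⟨pr, ⟨h1, h2⟩, hr⟩
        refine ⟨pr, ?_, hr⟩
        exact (pv_nearbyLoop_mem m (end_ + 50) hN pr _ (start - 50) PySem.Dict.empty rfl
          (by intro p hp; simp [PySem.Dict.keys, PySem.Dict.empty] at hp)).mpr
          (Or.inr ⟨h1, h2⟩)
    have hcount : (List.foldl (fun reads item =>
        List.foldl (fun reads j =>
          match pvSplitRead j with
          | some read => reads.insert read 1
          | none => reads) reads item.2)
        (PySem.Dict.empty : PySem.Dict String Int)
        (pvNearbyLoop m (start - 50) (end_ + 50) PySem.Dict.empty).items).size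
        = (List.foldl (fun s pn =>
            if start - 50 ≤ pn.1 ∧ pn.1 < end_ + 50 then
              List.foldl (fun s j =>
                match pvSplitRead j with
                | some r => PySem.Set.add s r
                | none => s) s pn.2
            else s) (PySem.Set.empty : PySem.Set String) m).length := by
      rw [pv_size_eq_keys_length, hA, hB, hperm.length_eq]
    rw [hcount]
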